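-- pv_equiv track=rewrite | github.com/ncmiller/garbage | adventofcode/2020/day20.py | monster_found
-- ===== SOURCE A (Python) =====
-- def monster_found(rows, sea_monster):
--     monster_len = len(sea_monster[0])
--     row_len = len(rows[0])
--
--     x_offsets = []
--     for x_offset in range(row_len - monster_len):
--         monster_found = True
--         for y in range(len(sea_monster)):
--             if not monster_found:
--                 break
--             for x in range(len(sea_monster[0])):
--                 if not monster_found:
--                     break
--                 sea_monster_c = sea_monster[y][x]
--                 row_c = rows[y][x_offset + x]
--                 if sea_monster_c == ' ':
--                     continue
--                 else:
--                     if row_c != '#':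
--                         monster_found = False
--         if monster_found:
--             x_offsets.append(x_offset)
--     return x_offsets
-- ===== SOURCE B (Python) =====
-- def monster_found(rows, sea_monster):
--     monster_len = len(sea_monster[0])
--     coords = [(y, x)
--               for y, rowpat in enumerate(sea_monster)
--               for x, c in enumerate(rowpat[:monster_len]) if c != ' ']
--     return [x_offset
--             for x_offset in range(len(rows[0]) - monster_len)
--             if all(rows[y][x_offset + x] == '#' for (y, x) in coords)]
-- ===== Notes on version B (the rewrite author's own statement) =====
-- stated objective: simpler
-- what changed: B precomputes the stencil's non-space cells once as a coordinate list and, per offset, checks only those cells with a short-circuiting all(), replacing A's triple nested grid scan driven by a break flag.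
import Mathlib
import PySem

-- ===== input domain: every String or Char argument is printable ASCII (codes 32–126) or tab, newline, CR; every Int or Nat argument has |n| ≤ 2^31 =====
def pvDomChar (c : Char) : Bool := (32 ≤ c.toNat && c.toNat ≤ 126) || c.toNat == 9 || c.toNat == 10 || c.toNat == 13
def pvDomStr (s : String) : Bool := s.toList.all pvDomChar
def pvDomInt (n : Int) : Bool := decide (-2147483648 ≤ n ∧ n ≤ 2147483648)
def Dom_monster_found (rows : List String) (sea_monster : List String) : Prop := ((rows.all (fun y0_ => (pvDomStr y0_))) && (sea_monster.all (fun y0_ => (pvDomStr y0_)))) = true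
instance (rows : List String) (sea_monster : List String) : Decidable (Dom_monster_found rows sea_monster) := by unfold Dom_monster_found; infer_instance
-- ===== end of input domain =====

-- B replaces A's break-flag triple loop by a precomputed list of the stencil's non-space
-- cells and one flat all()-pass per offset (objective: simpler).
-- Pre_ states exactly where the Python A returns (it raises IndexError elsewhere); the two
-- ports are total via PySem defaults and agree on every input, so the proof needs no more.

-- ===== PORT A =====
-- s[i] as a Char; the ' ' default is only reached where Python raises (excluded by Pre_)
def pvCharAt (s : String) (i : Int) : Char := (PySem.Str.pyGet? s i).getD ' '

def monster_found (rows : List String) (sea_monster : List String) : List Int :=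
  let monster_len : Int := PySem.Str.len (PySem.List.pyGetD sea_monster 0 "")
  let row_len : Int := PySem.Str.len (PySem.List.pyGetD rows 0 "")
  (PySem.List.pyRange 0 (row_len - monster_len) 1).foldl
    (fun x_offsets x_offset =>
      let found :=
        (PySem.List.pyRange 0 (sea_monster.length : Int) 1).foldl
          (fun found y =>
            if found = false then found
            else
              (PySem.List.pyRange 0 (PySem.Str.len (PySem.List.pyGetD sea_monster 0 "")) 1).foldl
                (fun found x =>
                  if found = false then found
                  else
                    let sea_monster_c := pvCharAt (PySem.List.pyGetD sea_monster y "") x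
                    let row_c := pvCharAt (PySem.List.pyGetD rows y "") (x_offset + x)
                    if sea_monster_c = ' ' then found
                    else if row_c ≠ '#' then false else found)
                found)
          true
      if found = true then x_offsets ++ [x_offset] else x_offsets)
    []

-- ===== PORT B =====
def monster_found_alt (rows : List String) (sea_monster : List String) : List Int :=
  let monster_len : Int := PySem.Str.len (PySem.List.pyGetD sea_monster 0 "")
  let coords : List (Int × Int) :=
    (PySem.List.enumerate sea_monster 0).flatMap (fun yr =>
      (PySem.List.enumerate (PySem.Str.slice yr.2 none (some monster_len)).toList 0).filterMap
        (fun xc => if xc.2 ≠ ' ' then some (yr.1, xc.1) else none))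
  (PySem.List.pyRange 0 (PySem.Str.len (PySem.List.pyGetD rows 0 "") - monster_len) 1).filter
    (fun x_offset =>
      coords.all (fun yx => pvCharAt (PySem.List.pyGetD rows yx.1 "") (x_offset + yx.2) = '#'))

-- ===== PRECONDITION & SPEC =====
-- Pre_ = exactly the inputs where Python A returns: both lists nonempty, and the row-major
-- window scan (which stops at its first mismatching non-space cell) never indexes past the
-- end of a grid row or past the grid's row list, nor past the end of a stencil row.
def pvIdxOK (rows : List String) (sea_monster : List String) (o y x : Nat) : Bool :=
  x < (sea_monster.getD y "").toList.length ∧ y < rows.length ∧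
    o + x < (rows.getD y "").toList.length

def pvCellPass (rows : List String) (sea_monster : List String) (o y x : Nat) : Bool :=
  (sea_monster.getD y "").toList.getD x ' ' = ' ' ∨
    (rows.getD y "").toList.getD (o + x) '.' = '#'

-- the scan at offset o is safe: each cell whose row-major predecessors are all in range and
-- all pass (space, or '#' in the grid) is itself in range
def pvScanSafe (rows : List String) (sea_monster : List String) : Bool :=
  (List.range ((rows.getD 0 "").toList.length - (sea_monster.getD 0 "").toList.length)).all
    fun o => (List.range sea_monster.length).all
      fun y => (List.range (sea_monster.getD 0 "").toList.length).all
        fun x =>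
          !((List.range sea_monster.length).all fun y' =>
              (List.range (sea_monster.getD 0 "").toList.length).all fun x' =>
                !(y' < y ∨ (y' = y ∧ x' < x)) ||
                  (pvIdxOK rows sea_monster o y' x' && pvCellPass rows sea_monster o y' x')) ||
            pvIdxOK rows sea_monster o y x

def Pre_monster_found (rows : List String) (sea_monster : List String) : Prop :=
  rows ≠ [] ∧ sea_monster ≠ [] ∧ pvScanSafe rows sea_monster = true

instance (rows : List String) (sea_monster : List String) : Decidable (Pre_monster_found rows sea_monster) := by
  unfold Pre_monster_found; infer_instance

def pvWitness_monster_found : List String × List String := (["#.#"], ["#"])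

def Spec_monster_found (rows : List String) (sea_monster : List String) (out : List Int) : Prop := out = monster_found_alt rows sea_monster
instance (rows : List String) (sea_monster : List String) (out : List Int) : Decidable (Spec_monster_found rows sea_monster out) := by unfold Spec_monster_found; infer_instance

-- ===== CLAIM (what is proved, stated in full; the proofs are below) =====
def Claim_equal_monster_found : Prop := ∀ (rows : List String) (sea_monster : List String), Dom_monster_found rows sea_monster → Pre_monster_found rows sea_monster → Spec_monster_found rows sea_monster (monster_found rows sea_monster)

-- ===== LEMMAS AND PROOFS =====

-- a break-flag fold is the conjunction of the per-element tests
theorem pv_flag_fold {α : Type} (step : Bool → α → Bool) (f : α → Bool)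
    (h1 : ∀ x, step false x = false) (h2 : ∀ x, step true x = f x) :
    ∀ (L : List α) (b : Bool), L.foldl step b = (b && L.all f) := by
  intro L
  induction L with
  | nil => intro b; cases b <;> simp
  | cons a l ih =>
    intro b
    cases b with
    | false => simp only [List.foldl_cons, h1]; rw [ih]; simp
    | true => simp only [List.foldl_cons, h2]; rw [ih]; simp

-- proof-side names for the pieces of the two ports
def pvG (rows : List String) (sea_monster : List String) (o y x : Int) : Bool :=
  decide (pvCharAt (PySem.List.pyGetD sea_monster y "") x = ' ') ||
    decide (pvCharAt (PySem.List.pyGetD rows y "") (o + x) = '#')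

def pvRowAll (rows : List String) (sea_monster : List String) (o y : Int) : Bool :=
  (PySem.List.pyRange 0 (PySem.Str.len (PySem.List.pyGetD sea_monster 0 "")) 1).all
    (fun x => pvG rows sea_monster o y x)

def pvAll (rows : List String) (sea_monster : List String) (o : Int) : Bool :=
  (PySem.List.pyRange 0 (sea_monster.length : Int) 1).all (pvRowAll rows sea_monster o)

def pvCoords (sea_monster : List String) : List (Int × Int) :=
  (PySem.List.enumerate sea_monster 0).flatMap (fun yr =>
    (PySem.List.enumerate
        (PySem.Str.slice yr.2 none (some (PySem.Str.len (PySem.List.pyGetD sea_monster 0 "")))).toList 0).filterMap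
      (fun xc => if xc.2 ≠ ' ' then some (yr.1, xc.1) else none))

def pvBpred (rows : List String) (sea_monster : List String) (o : Int) : Bool :=
  (pvCoords sea_monster).all
    (fun yx => decide (pvCharAt (PySem.List.pyGetD rows yx.1 "") (o + yx.2) = '#'))

-- A's break-flag double loop computes the conjunction over the whole stencil window
theorem pv_flag_eq_all (rows : List String) (sea_monster : List String) (o : Int) :
    ((PySem.List.pyRange 0 (sea_monster.length : Int) 1).foldl
      (fun found y =>
        if found = false then found
        else
          (PySem.List.pyRange 0 (PySem.Str.len (PySem.List.pyGetD sea_monster 0 "")) 1).foldl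
            (fun found x =>
              if found = false then found
              else
                if pvCharAt (PySem.List.pyGetD sea_monster y "") x = ' ' then found
                else if pvCharAt (PySem.List.pyGetD rows y "") (o + x) ≠ '#' then false else found)
            found)
      true) = pvAll rows sea_monster o := by
  rw [pv_flag_fold _ (pvRowAll rows sea_monster o)
      (fun y => by simp)
      (fun y => by
        rw [pv_flag_fold _ (fun x => pvG rows sea_monster o y x)
            (fun x => by simp)
            (fun x => by
              by_cases h1 : pvCharAt (PySem.List.pyGetD sea_monster y "") x = ' ' <;>
                by_cases h2 : pvCharAt (PySem.List.pyGetD rows y "") (o + x) = '#' <;>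
                  simp [pvG, h1, h2])]
        simp [pvRowAll])]
  simp [pvAll]

theorem pv_charAt_natCast (s : String) (k : Nat) :
    pvCharAt s (k : Int) = s.toList.getD k ' ' := by
  simp [pvCharAt, List.getD_eq_getElem?_getD]

theorem pv_slice_take (s : String) (k : Nat) :
    (PySem.Str.slice s none (some (k : Int))).toList = s.toList.take k := by
  simp [PySem.Str.slice, PySem.List.slice_to _ (Int.natCast_nonneg k)]

-- the stencil window test equals the hot-cell list test
theorem pv_window_eq (rows : List String) (sea_monster : List String) (o : Int) :
    pvAll rows sea_monster o = pvBpred rows sea_monster o := by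
  have hlen : PySem.Str.len (PySem.List.pyGetD sea_monster 0 "") =
      ((sea_monster.getD 0 "").toList.length : Int) := by
    simp [PySem.List.pyGetD_zero, PySem.Str.len]
  apply Bool.coe_iff_coe.mp
  simp only [pvAll, pvRowAll, pvG, pvBpred, pvCoords, hlen, pv_slice_take, List.all_eq_true]
  constructor
  case mp =>
    intro h c hc
    rcases List.mem_flatMap.mp hc with ⟨yr, hyr, hc2⟩
    rcases List.mem_filterMap.mp hc2 with ⟨xc, hxc, hcc⟩
    rcases (PySem.List.mem_enumerate_iff _ _ _).mp hyr with ⟨k, hk, hyreq⟩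
    subst hyreq
    rcases (PySem.List.mem_enumerate_iff _ _ _).mp hxc with ⟨j, hj, hxceq⟩
    subst hxceq
    have hj' := hj
    simp only [List.length_take, lt_min_iff] at hj'
    split_ifs at hcc with hne
    have hc' : c = ((0:Int) + (k:Int), (0:Int) + (j:Int)) := (Option.some_inj.mp hcc).symm
    subst hc'
    have hyb : ((0:Int) + (k:Int)) ∈ PySem.List.pyRange 0 (sea_monster.length : Int) 1 := by
      rw [PySem.List.mem_pyRange_one]; omega
    have hxb : ((j:Int)) ∈ PySem.List.pyRange 0 ((sea_monster.getD 0 "").toList.length : Int) 1 := by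
      rw [PySem.List.mem_pyRange_one]; omega
    have h2 := h _ hyb _ hxb
    rw [Bool.or_eq_true] at h2
    rcases h2 with h2 | h2
    · exfalso
      apply hne
      rw [decide_eq_true_iff] at h2
      rw [List.getElem_take]
      rw [zero_add, pv_charAt_natCast, PySem.List.pyGetD_natCast,
        List.getD_eq_getElem sea_monster "" hk,
        List.getD_eq_getElem _ ' ' hj'.2] at h2
      exact h2
    · simpa using h2
  case mpr =>
    intro h y hy x hx
    rw [PySem.List.mem_pyRange_one] at hy hx
    rw [Bool.or_eq_true]
    by_cases hsp : pvCharAt (PySem.List.pyGetD sea_monster y "") x = ' '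
    · left; simpa using hsp
    · right
      have hyk : y = ((y.toNat : Nat) : Int) := (Int.toNat_of_nonneg hy.1).symm
      have hxk : x = ((x.toNat : Nat) : Int) := (Int.toNat_of_nonneg hx.1).symm
      set k := y.toNat with hkdef
      set j := x.toNat with hjdef
      have hkH : k < sea_monster.length := by omega
      have hjM : j < (sea_monster.getD 0 "").toList.length := by omega
      rw [hyk, hxk, pv_charAt_natCast, PySem.List.pyGetD_natCast,
        List.getD_eq_getElem sea_monster "" hkH] at hsp
      have hjlen : j < (sea_monster[k]).toList.length := by
        by_contra hge
        exact hsp (List.getD_eq_default _ _ (by omega))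
      rw [List.getD_eq_getElem _ ' ' hjlen] at hsp
      have hjt : j < (List.take ((sea_monster.getD 0 "").toList.length)
          ((sea_monster[k]).toList)).length := by
        simp only [List.length_take, lt_min_iff]; exact ⟨hjM, hjlen⟩
      have h3 := h ((0:Int) + (k:Int), (0:Int) + (j:Int)) (by
        apply List.mem_flatMap.mpr
        refine ⟨((0:Int) + (k:Int), sea_monster[k]),
          (PySem.List.mem_enumerate_iff _ _ _).mpr ⟨k, hkH, rfl⟩, ?_⟩
        apply List.mem_filterMap.mpr
        refine ⟨((0:Int) + (j:Int),
          (List.take ((sea_monster.getD 0 "").toList.length) ((sea_monster[k]).toList))[j]'hjt),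
          (PySem.List.mem_enumerate_iff _ _ _).mpr ⟨j, hjt, rfl⟩, ?_⟩
        rw [if_pos]
        rw [List.getElem_take]
        exact hsp)
      rw [decide_eq_true_iff] at h3
      simp only [zero_add] at h3
      rw [decide_eq_true_iff, hyk, hxk]
      exact h3

-- the two ports agree on EVERY input (PySem defaults totalise both the same way)
theorem pv_ports_eq (rows : List String) (sea_monster : List String) :
    monster_found rows sea_monster = monster_found_alt rows sea_monster := by
  unfold monster_found monster_found_alt
  simp only [pv_flag_eq_all]
  show (PySem.List.pyRange 0
        (PySem.Str.len (PySem.List.pyGetD rows 0 "") -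
          PySem.Str.len (PySem.List.pyGetD sea_monster 0 "")) 1).foldl
      (fun acc o => if pvAll rows sea_monster o = true then acc ++ [o] else acc) [] =
    (PySem.List.pyRange 0
        (PySem.Str.len (PySem.List.pyGetD rows 0 "") -
          PySem.Str.len (PySem.List.pyGetD sea_monster 0 "")) 1).filter
      (fun o => pvBpred rows sea_monster o)
  rw [PySem.List.foldl_append_if_eq_filter (fun o => pvAll rows sea_monster o)]
  simp only [List.nil_append]
  exact List.filter_congr (fun o _ => pv_window_eq rows sea_monster o)

-- ===== VERDICT (by name: the statement is the Claim_ definition above) =====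
theorem monster_found_spec : Claim_equal_monster_found := by
  intro rows sea_monster _ _
  unfold Spec_monster_found
  exact pv_ports_eq rows sea_monster
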